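-- pv_equiv track=rewrite | github.com/medvedevgroup/minimizer-jaccard-estimator | winnowed_minimizers.py | winnowed_minimizers_linear
-- ===== SOURCE A (Python) =====
-- from collections import deque
--
-- def winnowed_minimizers_linear(perm,windowSize):
-- 	# note: we expect values in perm to be unique
-- 	# note: we treat perm as a linear sequence
-- 	# note: if len(perm) < windowSize, no minimizers will be reported
--
-- 	history = deque()	# ordered oldest (front) to most recent (back)
-- 						# this will contain (value,position) pairs
--
-- 	minimizers = set()
-- 	for ix in range(len(perm)):
-- 		windowIx = ix - (windowSize-1)
-- 		v = perm[ix]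
--
-- 		# (at the back) remove anything worse than the current value
--
-- 		while (len(history) > 0) and (history[-1][0] > v):
-- 			history.pop()
--
-- 		# push the current value and its position to back of the queue
--
-- 		history.append((v,ix))
--
-- 		# (at the front) remove any minima that are no longer in the current
-- 		# window
--
-- 		while (len(history) > 0) and (history[0][1] < windowIx):
-- 			history.popleft()
--
-- 		# copy the minimizer from window, but only if we are seeing it for
-- 		# the first time
--
-- 		if (windowIx >= 0) and (len(history) > 0):
-- 			vHistory = history[0]
-- 			if (vHistory not in minimizers):
-- 				yield vHistory
-- 				minimizers.add(vHistory)
-- ===== SOURCE B (Python) =====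
-- def winnowed_minimizers_linear(perm, windowSize):
--     # Rescan each window directly instead of maintaining a deque.
--     seen = set()
--     for ix in range(len(perm)):
--         windowIx = ix - (windowSize - 1)
--         if windowIx >= 0:
--             window = perm[windowIx:ix + 1]
--             if window:
--                 m = min(window)
--                 t = (m, windowIx + window.index(m))
--                 if t not in seen:
--                     yield t
--                     seen.add(t)
-- ===== Notes on version B (the rewrite author's own statement) =====
-- stated objective: simpler
-- what changed: Replaces A's amortized deque (monotone queue) maintenance with a direct rescan of each window slice: take perm[windowIx:ix+1], emit (min, position of first min) the first time that pair is seen.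
import Mathlib
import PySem

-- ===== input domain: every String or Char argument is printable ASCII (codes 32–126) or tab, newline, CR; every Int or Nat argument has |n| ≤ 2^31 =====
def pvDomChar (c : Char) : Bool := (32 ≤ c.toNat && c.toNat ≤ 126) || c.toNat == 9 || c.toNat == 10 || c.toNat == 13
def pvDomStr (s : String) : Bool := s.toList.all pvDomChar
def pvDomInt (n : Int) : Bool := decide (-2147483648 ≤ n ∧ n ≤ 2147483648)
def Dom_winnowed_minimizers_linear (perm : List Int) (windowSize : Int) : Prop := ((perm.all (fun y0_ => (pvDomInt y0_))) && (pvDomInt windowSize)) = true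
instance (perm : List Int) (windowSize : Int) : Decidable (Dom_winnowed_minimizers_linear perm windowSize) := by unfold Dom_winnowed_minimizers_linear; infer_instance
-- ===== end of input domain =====

-- B replaces A's amortized deque maintenance by a direct rescan (min + first index) of each
-- window slice: simpler code, same exact output (objective: simpler/alternative, not faster).

-- ===== PORT A =====
-- one iteration of A's 'for ix in range(len(perm))' loop; state = (history, minimizers, yielded)
def winnowed_minimizers_linear_step (perm : List Int) (windowSize : Int)
    (st : List (Int × Int) × PySem.Set (Int × Int) × List (Int × Int)) (ix : Int) :
    List (Int × Int) × PySem.Set (Int × Int) × List (Int × Int) :=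
  let history := st.1
  let minimizers := st.2.1
  let out := st.2.2
  let windowIx := ix - (windowSize - 1)
  let v := PySem.List.pyGetD perm ix 0
  -- while history and history[-1][0] > v: history.pop()   (pop a maximal suffix from the back)
  let history := (history.reverse.dropWhile (fun p => decide (v < p.1))).reverse
  -- history.append((v, ix))
  let history := history ++ [(v, ix)]
  -- while history and history[0][1] < windowIx: history.popleft()
  let history := history.dropWhile (fun p => decide (p.2 < windowIx))
  if 0 ≤ windowIx ∧ history ≠ [] then
    let vHistory := history.headD (0, 0)
    if vHistory ∈ minimizers then (history, minimizers, out)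
    else (history, PySem.Set.add minimizers vHistory, out ++ [vHistory])
  else (history, minimizers, out)

def winnowed_minimizers_linear (perm : List Int) (windowSize : Int) : List (Int × Int) :=
  ((PySem.List.pyRange 0 (PySem.List.len perm) 1).foldl
    (winnowed_minimizers_linear_step perm windowSize)
    ([], PySem.Set.empty, [])).2.2

-- ===== PORT B =====
-- one iteration of B's loop; state = (seen, yielded)
def winnowed_minimizers_linear_alt_step (perm : List Int) (windowSize : Int)
    (st : PySem.Set (Int × Int) × List (Int × Int)) (ix : Int) :
    PySem.Set (Int × Int) × List (Int × Int) :=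
  let windowIx := ix - (windowSize - 1)
  if 0 ≤ windowIx then
    let window := PySem.List.slice perm (some windowIx) (some (ix + 1))
    if window = [] then st
    else
      match PySem.List.min? window (fun x => x) with
      | none => st            -- unreachable: window ≠ []
      | some m =>
        match PySem.List.index? window m with
        | none => st          -- unreachable: m ∈ window
        | some idx =>
          let t := (m, windowIx + (idx : Int))
          if t ∈ st.1 then st
          else (PySem.Set.add st.1 t, st.2 ++ [t])
  else st

def winnowed_minimizers_linear_alt (perm : List Int) (windowSize : Int) : List (Int × Int) :=
  ((PySem.List.pyRange 0 (PySem.List.len perm) 1).foldl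
    (winnowed_minimizers_linear_alt_step perm windowSize)
    (PySem.Set.empty, [])).2

-- ===== PRECONDITION & SPEC =====
def Spec_winnowed_minimizers_linear (perm : List Int) (windowSize : Int) (out : List (Int × Int)) : Prop := out = winnowed_minimizers_linear_alt perm windowSize
instance (perm : List Int) (windowSize : Int) (out : List (Int × Int)) : Decidable (Spec_winnowed_minimizers_linear perm windowSize out) := by unfold Spec_winnowed_minimizers_linear; infer_instance

-- ===== CLAIM (what is proved, stated in full; the proofs are below) =====
def Claim_equal_winnowed_minimizers_linear : Prop := ∀ (perm : List Int) (windowSize : Int), Dom_winnowed_minimizers_linear perm windowSize → Spec_winnowed_minimizers_linear perm windowSize (winnowed_minimizers_linear perm windowSize)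

-- ===== LEMMAS AND PROOFS =====

-- predicate: position j survives in A's deque after the loop body for index N-1 has run
def pvKeep (perm : List Int) (w : Int) (N j : Nat) : Bool :=
  decide ((N : Int) - w ≤ (j : Int)) &&
    (List.range N).all (fun k => decide (k ≤ j) || decide (perm.getD j 0 ≤ perm.getD k 0))
def pvHist (perm : List Int) (w : Int) (N : Nat) : List (Int × Int) :=
  (List.range N).filterMap
    (fun j => if pvKeep perm w N j then some (perm.getD j 0, (j : Int)) else none)

lemma pvKeep_le (perm : List Int) (w : Int) (N j k : Nat) (h : pvKeep perm w N j = true)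
    (hjk : j < k) (hkN : k < N) : perm.getD j 0 ≤ perm.getD k 0 := by
  simp only [pvKeep, Bool.and_eq_true, List.all_eq_true, List.mem_range] at h
  have h2 := h.2 k hkN
  simp only [Bool.or_eq_true, decide_eq_true_eq] at h2
  rcases h2 with h' | h'
  · omega
  · exact h'

lemma pvHist_mem {perm : List Int} {w : Int} {N : Nat} {p : Int × Int}
    (hp : p ∈ pvHist perm w N) :
    ∃ j : Nat, j < N ∧ pvKeep perm w N j = true ∧ p = (perm.getD j 0, (j : Int)) := by
  simp only [pvHist, List.mem_filterMap, List.mem_range] at hp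
  rcases hp with ⟨j, hj, hsome⟩
  refine ⟨j, hj, ?_, ?_⟩ <;> (by_cases hk : pvKeep perm w N j = true <;> simp [hk] at hsome ⊢)
  exact hsome.symm

lemma pvHist_pairwise_pos (perm : List Int) (w : Int) (N : Nat) :
    (pvHist perm w N).Pairwise (fun a b => a.2 < b.2) := by
  refine List.Pairwise.filterMap _ (fun a b h x hx y hy => ?_) (List.pairwise_lt_range)
  by_cases ha : pvKeep perm w N a = true <;> simp [ha] at hx
  by_cases hb : pvKeep perm w N b = true <;> simp [hb] at hy
  subst hx; subst hy; simpa using h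

lemma pvHist_pairwise_val (perm : List Int) (w : Int) (N : Nat) :
    (pvHist perm w N).Pairwise (fun a b => a.1 ≤ b.1) := by
  have : (List.range N).Pairwise (fun a b =>
      ∀ x, (if pvKeep perm w N a then some (perm.getD a 0, (a : Int)) else none) = some x →
      ∀ y, (if pvKeep perm w N b then some (perm.getD b 0, (b : Int)) else none) = some y →
      x.1 ≤ y.1) := by
    rw [List.pairwise_iff_getElem]
    intro i j hi hj hij
    simp only [List.getElem_range]
    intro x hx y hy
    by_cases ha : pvKeep perm w N i = true <;> simp [ha] at hx
    by_cases hb : pvKeep perm w N j = true <;> simp [hb] at hy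
    subst hx; subst hy
    simp only [List.length_range] at hi hj
    exact pvKeep_le perm w N i j ha hij hj
  exact List.Pairwise.filterMap _ (fun a b h x hx y hy => h x hx y hy) this

lemma pv_dropWhile_eq_filter {α : Type} (pred : α → Bool) (l : List α)
    (h : l.Pairwise (fun a b => pred b = true → pred a = true)) :
    l.dropWhile pred = l.filter (fun x => !pred x) := by
  induction l with
  | nil => rfl
  | cons x xs ih =>
    rcases List.pairwise_cons.mp h with ⟨hx, hxs⟩
    by_cases hp : pred x = true
    · rw [List.dropWhile_cons_of_pos hp, List.filter_cons_of_neg (by simp [hp]), ih hxs]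
    · have hall : ∀ y ∈ xs, pred y = false := by
        intro y hy
        by_contra hc
        exact hp (hx y hy (by simpa using hc))
      have hp' : pred x = false := by simpa using hp
      rw [List.dropWhile_cons_of_neg (by simp [hp']), List.filter_cons_of_pos (by simp [hp'])]
      exact congrArg (x :: ·) (List.filter_eq_self.mpr (by intro y hy; simp [hall y hy])).symm

lemma pvKeep_succ (perm : List Int) (w : Int) (i j : Nat) (hj : j < i) :
    pvKeep perm w (i + 1) j =
      (pvKeep perm w i j && decide (perm.getD j 0 ≤ perm.getD i 0)
        && !decide ((j : Int) < (i : Int) - (w - 1))) := by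
  simp only [pvKeep, List.range_succ, List.all_append, List.all_cons, List.all_nil,
    Bool.and_true]
  rw [decide_eq_false (show ¬ (i ≤ j) by omega)]
  simp only [Bool.false_or]
  push_cast
  by_cases h2 : perm.getD j 0 ≤ perm.getD i 0
  · rw [decide_eq_true h2]
    by_cases h3 : (i : Int) + 1 - w ≤ (j : Int)
    · rw [decide_eq_true h3, decide_eq_true (show (i : Int) - w ≤ (j : Int) by omega),
        decide_eq_false (show ¬ ((j : Int) < (i : Int) - (w - 1)) by omega)]
      simp
    · rw [decide_eq_false h3, decide_eq_true (show (j : Int) < (i : Int) - (w - 1) by omega)]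
      simp
  · rw [decide_eq_false h2]
    simp

lemma pvHist_step (perm : List Int) (w : Int) (i : Nat) :
    ((((pvHist perm w i).reverse.dropWhile (fun p => decide (perm.getD i 0 < p.1))).reverse
        ++ [(perm.getD i 0, (i : Int))]).dropWhile
      (fun p => decide (p.2 < (i : Int) - (w - 1)))) = pvHist perm w (i + 1) := by
  have hback : (pvHist perm w i).reverse.dropWhile (fun p => decide (perm.getD i 0 < p.1)) =
      (pvHist perm w i).reverse.filter (fun p => !decide (perm.getD i 0 < p.1)) := by
    apply pv_dropWhile_eq_filter
    rw [List.pairwise_reverse]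
    exact (pvHist_pairwise_val perm w i).imp (by
      intro a b hab h
      simp only [decide_eq_true_eq] at h ⊢
      omega)
  rw [hback, ← List.filter_reverse, List.reverse_reverse]
  have hfront : (((pvHist perm w i).filter (fun p => !decide (perm.getD i 0 < p.1)))
        ++ [(perm.getD i 0, (i : Int))]).dropWhile
        (fun p => decide (p.2 < (i : Int) - (w - 1))) =
      (((pvHist perm w i).filter (fun p => !decide (perm.getD i 0 < p.1)))
        ++ [(perm.getD i 0, (i : Int))]).filter
        (fun p => !decide (p.2 < (i : Int) - (w - 1))) := by
    apply pv_dropWhile_eq_filter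
    rw [List.pairwise_append]
    refine ⟨(pvHist_pairwise_pos perm w i).filter _ |>.imp ?_, List.pairwise_singleton _ _, ?_⟩
    · intro a b hab h
      simp only [decide_eq_true_eq] at h ⊢
      omega
    · intro a ha b hb
      rcases pvHist_mem (List.mem_of_mem_filter ha) with ⟨j, hji, _, rfl⟩
      simp only [List.mem_singleton] at hb
      subst hb
      simp only [decide_eq_true_eq]
      intro h
      omega
  rw [hfront, List.filter_append, List.filter_filter]
  simp only [pvHist, List.filter_filterMap, List.range_succ, List.filterMap_append]
  congr 1
  · apply List.filterMap_congr
    intro j hj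
    simp only [List.mem_range] at hj
    rw [pvKeep_succ perm w i j hj]
    by_cases hk : pvKeep perm w i j = true
    · rw [hk, if_pos rfl, Option.filter_some]
      by_cases h2 : perm.getD j 0 ≤ perm.getD i 0
      · rw [decide_eq_true h2, decide_eq_false (show ¬ (perm.getD i 0 < perm.getD j 0) by omega)]
        by_cases h3 : (j : Int) < (i : Int) - (w - 1)
        · rw [decide_eq_true h3]
          simp
        · rw [decide_eq_false h3]
          simp
      · rw [decide_eq_false h2, decide_eq_true (show perm.getD i 0 < perm.getD j 0 by omega)]
        by_cases h3 : (j : Int) < (i : Int) - (w - 1)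
        · rw [decide_eq_true h3]
          simp
        · rw [decide_eq_false h3]
          simp
    · simp only [Bool.not_eq_true] at hk
      rw [hk]
      simp
  · simp only [List.filterMap_cons, List.filterMap_nil]
    by_cases hw : 1 ≤ w
    · have hA : ¬ ((i : Int) < (i : Int) - (w - 1)) := by omega
      have h2 : pvKeep perm w (i + 1) i = true := by
        simp only [pvKeep, Bool.and_eq_true, List.all_eq_true, List.mem_range]
        refine ⟨by simp; omega, ?_⟩
        intro k hk
        simp
        omega
      rw [h2]
      simp [hA]
    · have hA : (i : Int) < (i : Int) - (w - 1) := by omega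
      have h2 : pvKeep perm w (i + 1) i = false := by
        have hfalse : ¬ ((((i + 1 : Nat)) : Int) - w ≤ (i : Int)) := by push_cast; omega
        simp only [pvKeep, decide_eq_false hfalse, Bool.false_and]
      rw [h2]
      simp [hA]

lemma pvKeep_top (perm : List Int) (w : Int) (i : Nat) (hw : 1 ≤ w) :
    pvKeep perm w (i + 1) i = true := by
  simp only [pvKeep, Bool.and_eq_true, List.all_eq_true, List.mem_range]
  refine ⟨by simp; omega, ?_⟩
  intro k hk
  simp
  omega

lemma pvHist_eq_nil_iff (perm : List Int) (w : Int) (i : Nat) :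
    (pvHist perm w (i + 1) = []) ↔ w ≤ 0 := by
  constructor
  · intro h
    by_contra hw
    have hmem : (perm.getD i 0, (i : Int)) ∈ pvHist perm w (i + 1) := by
      simp only [pvHist, List.mem_filterMap]
      exact ⟨i, by simp, by rw [pvKeep_top perm w i (by omega)]; simp⟩
    rw [h] at hmem
    simp at hmem
  · intro hw
    apply List.filterMap_eq_nil_iff.mpr
    intro j hj
    simp only [List.mem_range] at hj
    have : pvKeep perm w (i + 1) j = false := by
      have hfalse : ¬ ((((i + 1 : Nat)) : Int) - w ≤ (j : Int)) := by push_cast; omega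
      simp only [pvKeep, decide_eq_false hfalse, Bool.false_and]
    rw [this]
    simp

lemma pv_headD_filterMap_range {f : Nat → Option (Int × Int)} {N j0 : Nat} (hj0 : j0 < N)
    (hnone : ∀ j, j < j0 → f j = none) {y : Int × Int} (hy : f j0 = some y) :
    ((List.range N).filterMap f).headD (0, 0) = y := by
  have hsplit : List.range N = List.range j0 ++ (List.range (N - j0)).map (j0 + ·) := by
    rw [← List.range_add]
    congr 1
    omega
  rw [hsplit, List.filterMap_append,
    List.filterMap_eq_nil_iff.mpr (by intro a ha; exact hnone a (List.mem_range.mp ha))]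
  obtain ⟨k, hk⟩ : ∃ k, N - j0 = k + 1 := ⟨N - j0 - 1, by omega⟩
  rw [hk, List.range_succ_eq_map]
  simp only [List.map_cons, List.filterMap_cons, Nat.add_zero, hy]
  simp

lemma pvHist_head (perm : List Int) (w : Int) (i : Nat) (hi : i < perm.length)
    (hw : 1 ≤ w) (hlo : 0 ≤ (i : Int) - (w - 1)) (m : Int) (idx : Nat)
    (hm : PySem.List.min? (PySem.List.slice perm (some ((i : Int) - (w - 1))) (some ((i : Int) + 1))) (fun x => x) = some m)
    (hidx : PySem.List.index? (PySem.List.slice perm (some ((i : Int) - (w - 1))) (some ((i : Int) + 1))) m = some idx) :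
    (pvHist perm w (i + 1)).headD (0, 0) = (m, ((i : Int) - (w - 1)) + (idx : Int)) := by
  set lo : Int := (i : Int) - (w - 1) with hloDef
  set L : Nat := lo.toNat with hL
  have hLi : (lo : Int) = (L : Int) := by omega
  have hLle : L ≤ i := by omega
  have hwin : PySem.List.slice perm (some lo) (some ((i : Int) + 1)) =
      (perm.drop L).take (i + 1 - L) := by
    rw [PySem.List.slice_toNat perm hlo (by omega)]
    have h1 : ((i : Int) + 1).toNat = i + 1 := by omega
    rw [h1]
  set window : List Int := (perm.drop L).take (i + 1 - L) with hwinDef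
  rw [hwin] at hm hidx
  have hwlen : window.length = i + 1 - L := by
    simp [hwinDef]
    omega
  have hwelem : ∀ k, (hk : k < window.length) → window[k] = perm.getD (L + k) 0 := by
    intro k hk
    have hk2 : L + k < perm.length := by rw [hwlen] at hk; omega
    rw [List.getD_eq_getElem perm 0 hk2]
    simp only [hwinDef, List.getElem_take, List.getElem_drop]
  have hmin : ∀ y ∈ window, m ≤ y := by
    intro y hy
    have := PySem.List.min?_isMin hm y hy
    simpa using this
  obtain ⟨hidxlt, hidxe, hidxfirst⟩ := PySem.List.getElem_of_index?_eq_some hidx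
  -- the head position
  set j0 : Nat := L + idx with hj0
  have hj0i : j0 ≤ i := by omega
  have hj0v : perm.getD j0 0 = m := by rw [← hwelem idx hidxlt, hidxe]
  have hkeep : pvKeep perm w (i + 1) j0 = true := by
    simp only [pvKeep, Bool.and_eq_true, List.all_eq_true, List.mem_range, Bool.or_eq_true,
      decide_eq_true_eq]
    refine ⟨by omega, ?_⟩
    intro k hk
    by_cases hkj : k ≤ j0
    · exact Or.inl hkj
    · refine Or.inr ?_
      rw [hj0v]
      have hkw : k - L < window.length := by omega
      have := hmin _ (List.getElem_mem hkw)
      rw [hwelem _ hkw] at this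
      have hkL : L + (k - L) = k := by omega
      rwa [hkL] at this
  have hnone : ∀ j, j < j0 → (if pvKeep perm w (i + 1) j then some (perm.getD j 0, (j : Int)) else none) = none := by
    intro j hj
    have : pvKeep perm w (i + 1) j = false := by
      by_cases hjL : j < L
      · have hfalse : ¬ ((((i + 1 : Nat)) : Int) - w ≤ (j : Int)) := by push_cast; omega
        simp only [pvKeep, decide_eq_false hfalse, Bool.false_and]
      · -- L ≤ j < j0 : perm[j] > m, killed by k = j0
        have hjw : j - L < window.length := by omega
        have hne : window[j - L] ≠ m := hidxfirst (j - L) (by omega)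
        have hge := hmin _ (List.getElem_mem hjw)
        have hjv : window[j - L] = perm.getD j 0 := by
          rw [hwelem _ hjw]
          congr 1
          omega
        rw [hjv] at hne hge
        have hgt : m < perm.getD j 0 := lt_of_le_of_ne hge (Ne.symm hne)
        rw [Bool.eq_false_iff]
        intro hcon
        simp only [pvKeep, Bool.and_eq_true, List.all_eq_true, List.mem_range, Bool.or_eq_true,
          decide_eq_true_eq] at hcon
        rcases hcon with ⟨-, hall⟩
        rcases hall j0 (by omega) with h | h
        · omega
        · rw [hj0v] at h
          omega
    rw [this]
    simp
  have := pv_headD_filterMap_range (f := fun j => if pvKeep perm w (i + 1) j then some (perm.getD j 0, (j : Int)) else none)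
    (N := i + 1) (j0 := j0) (by omega) hnone (y := (m, (j0 : Int)))
    (by
      have h : (if pvKeep perm w (i + 1) j0 = true then some (perm.getD j0 0, (j0 : Int)) else none)
          = some (m, (j0 : Int)) := by rw [hkeep, if_pos rfl, hj0v]
      exact h)
  rw [pvHist, this]
  simp only [Prod.mk.injEq]
  exact ⟨trivial, by omega⟩

-- the window slice is empty exactly when windowSize ≤ 0 (given 0 ≤ windowIx and i < len)
lemma pvWindow_nil (perm : List Int) (w : Int) (i : Nat)
    (h0 : 0 ≤ (i : Int) - (w - 1)) (hw : w ≤ 0) :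
    PySem.List.slice perm (some ((i : Int) - (w - 1))) (some ((i : Int) + 1)) = [] := by
  rw [PySem.List.slice_toNat perm h0 (by omega)]
  have h1 : ((i : Int) + 1).toNat - ((i : Int) - (w - 1)).toNat = 0 := by omega
  rw [h1]
  simp

lemma pvWindow_ne_nil (perm : List Int) (w : Int) (i : Nat) (hi : i < perm.length)
    (h0 : 0 ≤ (i : Int) - (w - 1)) (hw : 1 ≤ w) :
    PySem.List.slice perm (some ((i : Int) - (w - 1))) (some ((i : Int) + 1)) ≠ [] := by
  rw [PySem.List.slice_toNat perm h0 (by omega)]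
  intro hcon
  have := congrArg List.length hcon
  simp at this
  omega

-- one loop iteration of A, started at the deque spec, is one loop iteration of B
lemma pvStep_eq (perm : List Int) (w : Int) (i : Nat) (hi : i < perm.length)
    (st : PySem.Set (Int × Int) × List (Int × Int)) :
    winnowed_minimizers_linear_step perm w (pvHist perm w i, st) ((i : Nat) : Int) =
    (pvHist perm w (i + 1), winnowed_minimizers_linear_alt_step perm w st ((i : Nat) : Int)) := by
  simp only [winnowed_minimizers_linear_step, winnowed_minimizers_linear_alt_step,
    PySem.List.pyGetD_natCast, List.getD_eq_getElem?_getD]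
  rw [show ((perm[i]?).getD 0 : Int) = perm.getD i 0 from rfl]
  rw [pvHist_step]
  by_cases h0 : (0 : Int) ≤ (i : Int) - (w - 1)
  · by_cases hw : 1 ≤ w
    · have hne : pvHist perm w (i + 1) ≠ [] := by
        rw [ne_eq, pvHist_eq_nil_iff]
        omega
      have hwne := pvWindow_ne_nil perm w i hi h0 hw
      obtain ⟨m, hm⟩ : ∃ m, PySem.List.min?
          (PySem.List.slice perm (some ((i : Int) - (w - 1))) (some ((i : Int) + 1)))
          (fun x => x) = some m := by
        rcases hopt : PySem.List.min?
            (PySem.List.slice perm (some ((i : Int) - (w - 1))) (some ((i : Int) + 1)))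
            (fun x => x) with _ | m
        · exact absurd ((PySem.List.min?_eq_none_iff _ _).mp hopt) hwne
        · exact ⟨m, rfl⟩
      obtain ⟨idx, hidx⟩ : ∃ idx, PySem.List.index?
          (PySem.List.slice perm (some ((i : Int) - (w - 1))) (some ((i : Int) + 1)))
          m = some idx := by
        have hmem := PySem.List.min?_mem hm
        have := (PySem.List.index?_isSome_iff _ _).mpr hmem
        exact Option.isSome_iff_exists.mp this
      have hhead := pvHist_head perm w i hi hw h0 m idx hm hidx
      rw [if_pos ⟨h0, hne⟩, if_pos h0, if_neg hwne, hhead]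
      simp only [hm, hidx]
      by_cases ht : (m, (i : Int) - (w - 1) + (idx : Int)) ∈ st.1
      · simp [ht]
      · simp [ht]
    · have hnil : pvHist perm w (i + 1) = [] := (pvHist_eq_nil_iff perm w i).mpr (by omega)
      rw [if_neg (by rw [hnil]; simp), if_pos h0, if_pos (pvWindow_nil perm w i h0 (by omega)),
        hnil]
  · rw [if_neg (by intro h; exact h0 h.1), if_neg h0]

-- the loop invariant: A's state after i iterations is (deque spec, B's state after i iterations)
lemma pvMain (perm : List Int) (w : Int) :
    ∀ i, i ≤ perm.length →
      (List.range i).foldl (fun st (j : Nat) => winnowed_minimizers_linear_step perm w st (j : Int))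
          ([], PySem.Set.empty, []) =
        (pvHist perm w i,
          (List.range i).foldl (fun st (j : Nat) => winnowed_minimizers_linear_alt_step perm w st (j : Int))
            (PySem.Set.empty, [])) := by
  intro i
  induction i with
  | zero => intro _; rfl
  | succ k ih =>
    intro hk
    rw [List.range_succ, List.foldl_append, List.foldl_append, ih (by omega)]
    simp only [List.foldl_cons, List.foldl_nil]
    exact pvStep_eq perm w k (by omega) _

-- ===== VERDICT (by name: the statement is the Claim_ definition above) =====
theorem winnowed_minimizers_linear_spec : Claim_equal_winnowed_minimizers_linear := by
  intro perm w _
  unfold Spec_winnowed_minimizers_linear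
  unfold winnowed_minimizers_linear winnowed_minimizers_linear_alt
  simp only [PySem.List.len_eq]
  rw [PySem.List.pyRange_zero_nat, List.foldl_map, List.foldl_map,
    pvMain perm w perm.length le_rfl]
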